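-- pv_equiv track=rewrite | github.com/endrmfek/AlgorithmParctice | 프로그래머스/lv2/131127. 할인 행사/할인 행사.py | solution
-- ===== SOURCE A (Python) =====
-- from collections import Counter
--
-- def solution(want, number, discount):
--     answer = 0
--     dic = {}
--     for i in range(len(want)):
--         dic[want[i]] = number[i]
--
--     n = sum(number)
--
--     for i in range(len(discount)-n+1):
--         if dic == Counter(discount[i:i+n]):
--             answer+=1
--
--     return answer
-- ===== SOURCE B (Python) =====
-- from collections import Counter
--
--
-- def solution(want, number, discount):
--     need = dict(zip(want, number))
--     n = sum(number)
--     if n > len(discount):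
--         return 0
--     window = Counter(discount[:n])
--     answer = 1 if window == need else 0
--     for i in range(n, len(discount)):
--         window[discount[i]] += 1
--         left = discount[i - n]
--         window[left] -= 1
--         if window[left] == 0:
--             del window[left]
--         answer += 1 if window == need else 0
--     return answer
-- ===== Notes on version B (the rewrite author's own statement) =====
-- stated objective: alternative
-- what changed: A rebuilds a Counter of the n-element slice for every window; B builds the window Counter once and slides it, adding the entering item and removing the leaving one, comparing against the wanted dict each step. Pre_ excludes inputs where A raises IndexError (len(want) > len(number)) and inputs with sum(number) < 0, where B itself raises IndexError and A's nonempty negative-length windows are a slicing accident.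
-- outside the precondition, e.g. on solution(['a'], [-1], ['a']): A returns 0, B raises IndexError
import Mathlib
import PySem

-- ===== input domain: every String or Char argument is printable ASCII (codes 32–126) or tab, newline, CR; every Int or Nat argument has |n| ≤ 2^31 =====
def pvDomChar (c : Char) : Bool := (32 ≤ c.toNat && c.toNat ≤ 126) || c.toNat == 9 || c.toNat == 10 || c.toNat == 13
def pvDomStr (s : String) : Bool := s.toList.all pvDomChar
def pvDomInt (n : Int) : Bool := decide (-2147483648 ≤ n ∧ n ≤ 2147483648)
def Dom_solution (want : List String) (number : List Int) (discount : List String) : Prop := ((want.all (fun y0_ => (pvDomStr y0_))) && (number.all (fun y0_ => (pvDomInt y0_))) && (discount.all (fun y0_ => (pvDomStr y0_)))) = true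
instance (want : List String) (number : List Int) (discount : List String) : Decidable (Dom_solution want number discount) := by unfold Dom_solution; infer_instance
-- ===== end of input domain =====

-- B replaces A's per-window Counter rebuild with one sliding window Counter updated
-- incrementally (objective: alternative algorithm).

-- ===== PORT A =====
-- Python mapping equality (`dic == Counter(...)` / `window == need`): same key set and
-- same value at every key, insertion order ignored.  Exact for dicts with Nodup keys,
-- which every dict here has.
def pyDictEq (d1 d2 : PySem.Dict String Int) : Bool :=
  d1.size == d2.size && d1.keys.all (fun k => d2.get? k == d1.get? k)

def solution (want : List String) (number : List Int) (discount : List String) : Int :=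
  -- answer = 0; dic = {}; for i in range(len(want)): dic[want[i]] = number[i]
  -- (number[i] raises IndexError when len(want) > len(number): excluded by Pre_; the .getD
  --  defaults are never reached inside Pre_)
  let dic : PySem.Dict String Int :=
    (PySem.List.pyRange 0 (want.length : Int) 1).foldl
      (fun d i => d.insert ((PySem.List.pyGet? want i).getD "") ((PySem.List.pyGet? number i).getD 0))
      PySem.Dict.empty
  let n : Int := number.sum
  -- for i in range(len(discount)-n+1): if dic == Counter(discount[i:i+n]): answer += 1
  (PySem.List.pyRange 0 ((discount.length : Int) - n + 1) 1).foldl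
    (fun answer i =>
      if pyDictEq dic (PySem.Dict.counter (PySem.List.slice discount (some i) (some (i + n))))
      then answer + 1 else answer)
    0

-- ===== PORT B =====
def solution_alt (want : List String) (number : List Int) (discount : List String) : Int :=
  -- need = dict(zip(want, number)); n = sum(number)
  let need : PySem.Dict String Int :=
    (want.zip number).foldl (fun d p => d.insert p.1 p.2) PySem.Dict.empty
  let n : Int := number.sum
  -- if n > len(discount): return 0
  if (discount.length : Int) < n then 0
  else
    -- window = Counter(discount[:n]); answer = 1 if window == need else 0
    let window : PySem.Dict String Int :=
      PySem.Dict.counter (PySem.List.slice discount none (some n))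
    let answer : Int := if pyDictEq window need then 1 else 0
    -- for i in range(n, len(discount)): window[discount[i]] += 1; left = discount[i-n];
    --   window[left] -= 1; if window[left] == 0: del window[left];
    --   answer += 1 if window == need else 0
    ((PySem.List.pyRange n (discount.length : Int) 1).foldl
      (fun (st : PySem.Dict String Int × Int) i =>
        let x := (PySem.List.pyGet? discount i).getD ""
        let w1 := st.1.insert x (st.1.getD x 0 + 1)
        let left := (PySem.List.pyGet? discount (i - n)).getD ""
        let w2 := w1.insert left (w1.getD left 0 - 1)
        let w3 := if w2.getD left 0 == 0 then w2.erase left else w2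
        (w3, st.2 + if pyDictEq w3 need then 1 else 0))
      (window, answer)).2

-- ===== PRECONDITION & SPEC =====
-- Pre_ excludes (a) inputs with len(want) > len(number), on which A raises IndexError, and
-- (b) inputs with sum(number) < 0, on which B itself raises IndexError (discount[i-n] walks
-- past the end) while A's occasional nonempty windows come from negative slice bounds
-- wrapping around — a window of negative length is outside the task's natural domain.
def Pre_solution (want : List String) (number : List Int) (discount : List String) : Prop :=
  want.length ≤ number.length ∧ 0 ≤ number.sum
instance (want : List String) (number : List Int) (discount : List String) : Decidable (Pre_solution want number discount) := by unfold Pre_solution; infer_instance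

def pvWitness_solution : List String × List Int × List String :=
  (["apple", "pen"], [2, 1], ["pen", "apple", "apple", "banana", "pen", "apple"])

def Spec_solution (want : List String) (number : List Int) (discount : List String) (out : Int) : Prop := out = solution_alt want number discount
instance (want : List String) (number : List Int) (discount : List String) (out : Int) : Decidable (Spec_solution want number discount out) := by unfold Spec_solution; infer_instance

-- ===== CLAIM (what is proved, stated in full; the proofs are below) =====
def Claim_equal_solution : Prop := ∀ (want : List String) (number : List Int) (discount : List String), Dom_solution want number discount → Pre_solution want number discount → Spec_solution want number discount (solution want number discount)

-- ===== LEMMAS AND PROOFS =====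

-- A's index-loop dict build = B's zip-loop dict build (when want is not longer than number)
theorem build_eq_aux (w : List String) : ∀ (num : List Int) (d : PySem.Dict String Int),
    w.length ≤ num.length →
    (List.range w.length).foldl
      (fun d i => d.insert ((PySem.List.pyGet? w (i : Int)).getD "")
        ((PySem.List.pyGet? num (i : Int)).getD 0)) d
      = (w.zip num).foldl (fun d p => d.insert p.1 p.2) d := by
  induction w with
  | nil => intro num d _; simp
  | cons a w ih =>
    intro num d hlen
    cases num with
    | nil => simp at hlen
    | cons b num =>
      rw [List.length_cons, List.range_succ_eq_map, List.foldl_cons, List.foldl_map]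
      simp only [PySem.List.pyGet?_natCast, List.getElem?_cons_zero, Option.getD_some]
      simp only [Nat.succ_eq_add_one]
      rw [List.zip_cons_cons, List.foldl_cons]
      rw [← ih num (d.insert a b) (by simpa using hlen)]
      apply PySem.List.foldl_congr_mem
      intro d' i _
      simp

theorem get?_of_mem_keys (d : PySem.Dict String Int) (k : String) (h : k ∈ d.keys) :
    ∃ v, d.get? k = some v := by
  have hc : d.contains k = true := (PySem.Dict.contains_iff_mem_keys d k).mpr h
  rw [PySem.Dict.contains_eq_isSome_get?] at hc
  exact Option.isSome_iff_exists.mp hc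

theorem counter_get?_of_mem (w : List String) (k : String) (h : k ∈ w) :
    (PySem.Dict.counter w).get? k = some ((w.count k : Int)) := by
  apply PySem.Dict.get?_of_mem_items _ ?_ (PySem.Dict.nodup_keys_counter w)
  rw [PySem.Dict.items_counter]
  exact List.mem_map_of_mem ((PySem.Set.mem_ofList _ _).mpr h)

theorem counter_get?_of_not_mem (w : List String) (k : String) (h : k ∉ w) :
    (PySem.Dict.counter w).get? k = none := by
  rw [PySem.Dict.get?_eq_none_iff_not_mem_keys, PySem.Dict.keys_counter]
  simpa [PySem.Set.mem_ofList] using h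

-- (counter l).get? as a function of the count
theorem counter_get?_char (l : List String) (k : String) :
    (PySem.Dict.counter l).get? k
      = if (l.count k : Int) = 0 then none else some ((l.count k : Int)) := by
  by_cases h : k ∈ l
  · rw [counter_get?_of_mem l k h, if_neg]
    have := List.count_pos_iff.mpr h
    omega
  · rw [counter_get?_of_not_mem l k h, if_pos]
    have := List.count_eq_zero.mpr h
    omega

theorem size_eq_keys_length (d : PySem.Dict String Int) : d.size = d.keys.length := by
  simp [PySem.Dict.size, PySem.Dict.keys]

-- erase: pointwise characterisation of get?
theorem find?_filter_ne (l : List (String × Int)) (k k' : String) :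
    List.find? (fun p => p.1 == k') (l.filter (fun p => !(p.1 == k)))
      = if k' = k then none else List.find? (fun p => p.1 == k') l := by
  induction l with
  | nil => simp
  | cons a l ih =>
    by_cases ha : a.1 = k
    · rw [List.filter_cons_of_neg (by simp [ha]), ih]
      by_cases hk : k' = k
      · rw [if_pos hk, if_pos hk]
      · have hne : ¬ (a.1 == k') = true := by
          rw [ha]; simp; exact fun h => hk h.symm
        rw [if_neg hk, if_neg hk,
          show List.find? (fun p => p.1 == k') (a :: l) = List.find? (fun p => p.1 == k') l
            from List.find?_cons_of_neg hne]
    · rw [List.filter_cons_of_pos (by simp [ha])]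
      by_cases h2 : a.1 = k'
      · have hk : ¬ k' = k := fun h => ha (h ▸ h2)
        rw [show List.find? (fun p => p.1 == k') (a :: l.filter (fun p => !(p.1 == k)))
            = some a from List.find?_cons_of_pos (by simp [h2]), if_neg hk,
          show List.find? (fun p => p.1 == k') (a :: l) = some a
            from List.find?_cons_of_pos (by simp [h2])]
      · rw [show List.find? (fun p => p.1 == k') (a :: l.filter (fun p => !(p.1 == k)))
            = List.find? (fun p => p.1 == k') (l.filter (fun p => !(p.1 == k)))
            from List.find?_cons_of_neg (by simp [h2]),
          show List.find? (fun p => p.1 == k') (a :: l) = List.find? (fun p => p.1 == k') l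
            from List.find?_cons_of_neg (by simp [h2]), ih]

theorem get?_erase_eq (d : PySem.Dict String Int) (k k' : String) :
    (d.erase k).get? k' = if k' = k then none else d.get? k' := by
  show ((List.find? (fun p => p.1 == k') (d.items.filter (fun p => !(p.1 == k)))).map (·.2))
      = if k' = k then none else ((List.find? (fun p => p.1 == k') d.items).map (·.2))
  rw [find?_filter_ne]
  split <;> rfl

theorem nodup_keys_erase (d : PySem.Dict String Int) (k : String) (h : d.keys.Nodup) :
    (d.erase k).keys.Nodup := by
  have hsub : ((d.items.filter (fun p => !(p.1 == k))).map (fun p => p.1)).Sublist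
      (d.items.map (fun p => p.1)) :=
    List.Sublist.map (fun p => p.1)
      (List.filter_sublist (l := d.items) (p := fun p => !(p.1 == k)))
  exact hsub.nodup h

-- Python mapping equality is pointwise get?-equality (for dicts with Nodup keys)
theorem pyDictEq_true_iff (d1 d2 : PySem.Dict String Int)
    (h1 : d1.keys.Nodup) (h2 : d2.keys.Nodup) :
    pyDictEq d1 d2 = true ↔ ∀ k, d1.get? k = d2.get? k := by
  unfold pyDictEq
  rw [Bool.and_eq_true, beq_iff_eq, List.all_eq_true]
  constructor
  · rintro ⟨hsz, hall⟩
    have hget : ∀ k ∈ d1.keys, d1.get? k = d2.get? k := by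
      intro k hk; exact (beq_iff_eq.mp (hall k hk)).symm
    have hsub : d1.keys ⊆ d2.keys := by
      intro k hk
      obtain ⟨v, hv⟩ := get?_of_mem_keys d1 k hk
      by_contra hk2
      have e2 : d2.get? k = none := by
        rw [PySem.Dict.get?_eq_none_iff_not_mem_keys]; exact hk2
      rw [hget k hk, e2] at hv
      simp at hv
    have hperm : d1.keys.Perm d2.keys := by
      apply List.Subperm.perm_of_length_le (List.subperm_of_subset h1 hsub)
      rw [← size_eq_keys_length, ← size_eq_keys_length, hsz]
    intro k
    by_cases hk : k ∈ d1.keys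
    · exact hget k hk
    · have hk2 : k ∉ d2.keys := fun h => hk (hperm.mem_iff.mpr h)
      have e1 : d1.get? k = none := by
        rw [PySem.Dict.get?_eq_none_iff_not_mem_keys]; exact hk
      have e2 : d2.get? k = none := by
        rw [PySem.Dict.get?_eq_none_iff_not_mem_keys]; exact hk2
      rw [e1, e2]
  · intro hp
    have hmem : ∀ k, k ∈ d1.keys ↔ k ∈ d2.keys := by
      intro k
      rw [← not_iff_not, ← PySem.Dict.get?_eq_none_iff_not_mem_keys,
        ← PySem.Dict.get?_eq_none_iff_not_mem_keys, hp k]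
    have hperm := (List.perm_ext_iff_of_nodup h1 h2).mpr hmem
    constructor
    · rw [size_eq_keys_length, size_eq_keys_length]
      exact hperm.length_eq
    · intro k _
      rw [beq_iff_eq, hp k]

-- replace one side of a Python `==` by a pointwise-equal dict and flip the sides
theorem pyDictEq_swap_congr (w c need : PySem.Dict String Int)
    (hw : ∀ k, w.get? k = c.get? k)
    (hwn : w.keys.Nodup) (hcn : c.keys.Nodup) (hnn : need.keys.Nodup) :
    pyDictEq w need = pyDictEq need c := by
  have h1 := pyDictEq_true_iff w need hwn hnn
  have h2 := pyDictEq_true_iff need c hnn hcn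
  have : pyDictEq w need = true ↔ pyDictEq need c = true := by
    rw [h1, h2]
    constructor
    · intro h k; rw [← hw k, h k]
    · intro h k; rw [hw k, ← h k]
  cases hA : pyDictEq w need <;> cases hB : pyDictEq need c <;> simp_all

theorem getD_of_counter_pointwise (w : PySem.Dict String Int) (u : List String)
    (hw : ∀ k, w.get? k = (PySem.Dict.counter u).get? k) (k : String) :
    w.getD k 0 = (u.count k : Int) := by
  rw [PySem.Dict.getD_eq_get?_getD, hw k, counter_get?_char]
  split
  · simp; omega
  · rfl

-- one sliding-window step keeps the window pointwise equal to the counter of the new slice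
theorem step_eq (w : PySem.Dict String Int) (u u' : List String) (x left : String)
    (hw : ∀ k, w.get? k = (PySem.Dict.counter u).get? k)
    (hcnt : ∀ k, (u'.count k : Int)
      = (u.count k : Int) + (if k = x then 1 else 0) - (if k = left then 1 else 0))
    (hpos : 1 ≤ (u.count left : Int) + (if left = x then 1 else 0)) (k : String) :
    (if ((w.insert x (w.getD x 0 + 1)).insert left
          ((w.insert x (w.getD x 0 + 1)).getD left 0 - 1)).getD left 0 == 0
      then ((w.insert x (w.getD x 0 + 1)).insert left
          ((w.insert x (w.getD x 0 + 1)).getD left 0 - 1)).erase left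
      else ((w.insert x (w.getD x 0 + 1)).insert left
          ((w.insert x (w.getD x 0 + 1)).getD left 0 - 1))).get? k
      = (PySem.Dict.counter u').get? k := by
  have hD := getD_of_counter_pointwise w u hw
  have hx0 : (0:Int) ≤ (u.count x : Int) := by positivity
  have hk0 : (0:Int) ≤ (u.count k : Int) := by positivity
  have hv1 : (w.insert x (w.getD x 0 + 1)).getD left 0
      = (u.count left : Int) + (if left = x then 1 else 0) := by
    rw [PySem.Dict.getD_insert, hD left, hD x]
    by_cases h : left = x <;> simp [h]
  have hval : ((w.insert x (w.getD x 0 + 1)).insert left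
      ((w.insert x (w.getD x 0 + 1)).getD left 0 - 1)).getD left 0
      = (u.count left : Int) + (if left = x then 1 else 0) - 1 := by
    rw [PySem.Dict.getD_insert, if_pos rfl, hv1]
  have hg2 : ∀ j, ((w.insert x (w.getD x 0 + 1)).insert left
      ((w.insert x (w.getD x 0 + 1)).getD left 0 - 1)).get? j
      = if j = left then some ((u.count left : Int) + (if left = x then 1 else 0) - 1)
        else if j = x then some ((u.count x : Int) + 1) else w.get? j := by
    intro j
    rw [PySem.Dict.get?_insert, hv1]
    by_cases hj : j = left
    · rw [if_pos hj, if_pos hj]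
    · rw [if_neg hj, if_neg hj, PySem.Dict.get?_insert]
      by_cases hjx : j = x
      · rw [if_pos hjx, if_pos hjx, hD x]
      · rw [if_neg hjx, if_neg hjx]
  rw [hval, counter_get?_char u']
  by_cases hz : (u.count left : Int) + (if left = x then 1 else 0) - 1 = 0
  · rw [if_pos (beq_iff_eq.mpr hz), get?_erase_eq]
    by_cases hkl : k = left
    · rw [if_pos hkl]
      rw [if_pos (show (u'.count k : Int) = 0 by
        rw [hkl]
        have hck := hcnt left
        rw [if_pos rfl] at hck
        omega)]
    · rw [if_neg hkl, hg2 k, if_neg hkl]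
      have hck := hcnt k
      rw [if_neg hkl] at hck
      by_cases hkx : k = x
      · rw [if_pos hkx] at hck
        rw [if_pos hkx, if_neg (by omega), ← hkx]
        congr 1
        omega
      · rw [if_neg hkx] at hck
        rw [if_neg hkx, hw k, counter_get?_char u]
        have he : (u'.count k : Int) = (u.count k : Int) := by omega
        rw [he]
  · rw [if_neg (fun h => hz (beq_iff_eq.mp h)), hg2 k]
    by_cases hkl : k = left
    · rw [if_pos hkl, hkl]
      have hck := hcnt left
      rw [if_pos rfl] at hck
      by_cases hlx : left = x
      · rw [if_pos hlx] at hck hz ⊢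
        rw [if_neg (by omega)]
        congr 1
        omega
      · rw [if_neg hlx] at hck hz ⊢
        rw [if_neg (by omega)]
        congr 1
        omega
    · rw [if_neg hkl]
      have hck := hcnt k
      rw [if_neg hkl] at hck
      by_cases hkx : k = x
      · rw [if_pos hkx] at hck
        rw [if_pos hkx, if_neg (by omega), ← hkx]
        congr 1
        omega
      · rw [if_neg hkx] at hck
        rw [if_neg hkx, hw k, counter_get?_char u]
        have he : (u'.count k : Int) = (u.count k : Int) := by omega
        rw [he]

theorem nodup_keys_step (w : PySem.Dict String Int) (x left : String) (v1 v2 : Int)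
    (h : w.keys.Nodup) :
    (if ((w.insert x v1).insert left v2).getD left 0 == 0
      then ((w.insert x v1).insert left v2).erase left
      else ((w.insert x v1).insert left v2)).keys.Nodup := by
  have h2 := PySem.Dict.nodup_keys_insert _ left v2 (PySem.Dict.nodup_keys_insert w x v1 h)
  split
  · exact nodup_keys_erase _ left h2
  · exact h2

-- the main loop invariant: from a window matching slice [a, a+m) the loop contributes
-- exactly the matching windows with start a+1 … L-m
theorem loop_lemma (need : PySem.Dict String Int) (hnn : need.keys.Nodup)
    (discount : List String) (m : Nat) : ∀ (b a : Nat),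
    a + m + b = discount.length →
    ∀ (w : PySem.Dict String Int) (ans : Int),
    (∀ k, w.get? k = (PySem.Dict.counter ((discount.drop a).take m)).get? k) →
    w.keys.Nodup →
    ((PySem.List.pyRange ((a + m : Nat) : Int) (discount.length : Int) 1).foldl
        (fun (st : PySem.Dict String Int × Int) i =>
          let x := (PySem.List.pyGet? discount i).getD ""
          let w1 := st.1.insert x (st.1.getD x 0 + 1)
          let left := (PySem.List.pyGet? discount (i - (m : Int))).getD ""
          let w2 := w1.insert left (w1.getD left 0 - 1)
          let w3 := if w2.getD left 0 == 0 then w2.erase left else w2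
          (w3, st.2 + if pyDictEq w3 need then 1 else 0)) (w, ans)).2
      = ans + ((PySem.List.pyRange ((a + 1 : Nat) : Int) ((discount.length : Int) - (m : Int) + 1) 1).countP
          (fun i => pyDictEq need
            (PySem.Dict.counter (PySem.List.slice discount (some i) (some (i + (m : Int)))))) : Int) := by
  intro b
  induction b with
  | zero =>
    intro a hL w ans hw hnd
    rw [PySem.List.pyRange_one_eq_nil (by omega), List.foldl_nil,
      PySem.List.pyRange_one_eq_nil (by push_cast; omega)]
    simp
  | succ b ih =>
    intro a hL w ans hw hnd
    have haL : a < discount.length := by omega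
    have hamL : a + m < discount.length := by omega
    rw [PySem.List.pyRange_one_cons (by push_cast; omega), List.foldl_cons]
    have hx : (PySem.List.pyGet? discount ((a + m : Nat) : Int)).getD ""
        = discount[a + m] := by
      rw [PySem.List.pyGet?_natCast, List.getElem?_eq_getElem hamL, Option.getD_some]
    have hleft : (PySem.List.pyGet? discount (((a + m : Nat) : Int) - (m : Int))).getD ""
        = discount[a] := by
      rw [show (((a + m : Nat) : Int) - (m : Int)) = ((a : Nat) : Int) by push_cast; ring,
        PySem.List.pyGet?_natCast, List.getElem?_eq_getElem haL, Option.getD_some]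
    -- count facts for the old and new slices
    have hcnt : ∀ k, ((((discount.drop (a + 1)).take m).count k : Int)
        = (((discount.drop a).take m).count k : Int)
          + (if k = discount[a + m] then 1 else 0) - (if k = discount[a] then 1 else 0)) := by
      intro k
      cases m with
      | zero =>
        simp only [List.take_zero, List.count_nil]
        have he : discount[a + 0] = discount[a] := by congr 1
        rw [he]
        split <;> omega
      | succ m' =>
        have hu : (discount.drop a).take (m' + 1)
            = discount[a] :: ((discount.drop (a + 1)).take m') := by
          rw [List.drop_eq_getElem_cons haL, List.take_succ_cons]
        have hu' : (discount.drop (a + 1)).take (m' + 1)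
            = ((discount.drop (a + 1)).take m') ++ [discount[a + (m' + 1)]] := by
          rw [List.take_succ]
          congr 1
          rw [List.getElem?_drop, List.getElem?_eq_getElem (by omega)]
          have he : a + 1 + m' = a + (m' + 1) := by omega
          simp [he]
        rw [hu, hu']
        simp only [List.count_append, List.count_cons, List.count_nil,
          beq_iff_eq]
        by_cases h1 : k = discount[a + (m' + 1)] <;> by_cases h2 : k = discount[a] <;>
          simp only [h1, h2, if_true, if_false, eq_comm] <;> (try simp) <;> push_cast <;> omega
    have hpos : 1 ≤ ((((discount.drop a).take m).count discount[a] : Int)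
        + (if discount[a] = discount[a + m] then 1 else 0)) := by
      cases m with
      | zero =>
        have he : discount[a + 0] = discount[a] := by congr 1
        rw [he, if_pos rfl]
        have : (0:Int) ≤ (((discount.drop a).take 0).count discount[a] : Int) := by positivity
        omega
      | succ m' =>
        have hu : (discount.drop a).take (m' + 1)
            = discount[a] :: ((discount.drop (a + 1)).take m') := by
          rw [List.drop_eq_getElem_cons haL, List.take_succ_cons]
        rw [hu, List.count_cons_self]
        have : (0:Int) ≤ (((discount.drop (a + 1)).take m').count discount[a] : Int) := by
          positivity
        split <;> omega
    have hw' := fun k => step_eq w ((discount.drop a).take m) ((discount.drop (a + 1)).take m)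
      discount[a + m] discount[a] hw hcnt hpos k
    have hnd' := nodup_keys_step w discount[a + m] discount[a]
      (w.getD discount[a + m] 0 + 1)
      ((w.insert discount[a + m] (w.getD discount[a + m] 0 + 1)).getD discount[a] 0 - 1) hnd
    dsimp only
    rw [hx, hleft]
    rw [show ((a + m : Nat) : Int) + 1 = ((a + 1 + m : Nat) : Int) by push_cast; ring]
    rw [ih (a + 1) (by omega) _ _ hw' hnd']
    rw [show (PySem.List.pyRange ((a + 1 : Nat) : Int) ((discount.length : Int) - (m : Int) + 1) 1)
        = ((a + 1 : Nat) : Int) :: PySem.List.pyRange (((a + 1 : Nat) : Int) + 1) ((discount.length : Int) - (m : Int) + 1) 1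
      from PySem.List.pyRange_one_cons (by push_cast; omega)]
    rw [List.countP_cons]
    have hflag : pyDictEq (if ((w.insert discount[a + m] (w.getD discount[a + m] 0 + 1)).insert discount[a]
          ((w.insert discount[a + m] (w.getD discount[a + m] 0 + 1)).getD discount[a] 0 - 1)).getD discount[a] 0 == 0
        then ((w.insert discount[a + m] (w.getD discount[a + m] 0 + 1)).insert discount[a]
            ((w.insert discount[a + m] (w.getD discount[a + m] 0 + 1)).getD discount[a] 0 - 1)).erase discount[a]
        else ((w.insert discount[a + m] (w.getD discount[a + m] 0 + 1)).insert discount[a]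
            ((w.insert discount[a + m] (w.getD discount[a + m] 0 + 1)).getD discount[a] 0 - 1))) need
        = pyDictEq need
          (PySem.Dict.counter (PySem.List.slice discount (some ((a + 1 : Nat) : Int))
            (some (((a + 1 : Nat) : Int) + (m : Int))))) := by
      rw [PySem.List.slice_natCast_add]
      exact pyDictEq_swap_congr _ _ need hw' hnd' (PySem.Dict.nodup_keys_counter _) hnn
    rw [hflag]
    have hc : ((a + 1 + 1 : Nat) : Int) = ((a + 1 : Nat) : Int) + 1 := by push_cast; ring
    rw [← hc]
    split <;> push_cast <;> ring

theorem main_thm (want : List String) (number : List Int) (discount : List String)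
    (hlen : want.length ≤ number.length) (hn0 : (0:Int) ≤ number.sum) :
    solution want number discount = solution_alt want number discount := by
  unfold solution solution_alt
  dsimp only
  have hbuild : (PySem.List.pyRange 0 (want.length : Int) 1).foldl
      (fun d i => d.insert ((PySem.List.pyGet? want i).getD "")
        ((PySem.List.pyGet? number i).getD 0)) PySem.Dict.empty
      = (want.zip number).foldl (fun d p => d.insert p.1 p.2) PySem.Dict.empty := by
    rw [PySem.List.pyRange_zero_natCast, List.foldl_map]
    exact build_eq_aux want number _ hlen
  rw [hbuild]
  set D := (want.zip number).foldl (fun d p => d.insert p.1 p.2) PySem.Dict.empty with hD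
  have hnn : D.keys.Nodup :=
    PySem.Dict.nodup_keys_foldl_insert_key (want.zip number) Prod.fst (fun _ p => p.2)
      PySem.Dict.empty (by simp [PySem.Dict.keys_empty])
  obtain ⟨m, hm⟩ : ∃ m : Nat, number.sum = (m : Int) :=
    ⟨number.sum.toNat, (Int.toNat_of_nonneg hn0).symm⟩
  rw [hm]
  by_cases hLm : (discount.length : Int) < (m : Int)
  · rw [if_pos hLm, PySem.List.pyRange_one_eq_nil (by omega), List.foldl_nil]
  · rw [if_neg hLm]
    have hmL : m ≤ discount.length := by exact_mod_cast not_lt.mp hLm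
    have hwin : PySem.Dict.counter (PySem.List.slice discount none (some (m : Int)))
        = PySem.Dict.counter ((discount.drop 0).take m) := by
      rw [PySem.List.slice_to discount (by positivity), Int.toNat_natCast, List.drop_zero]
    have hw0 : ∀ k, (PySem.Dict.counter (PySem.List.slice discount none (some ((m : Nat) : Int)))).get? k
        = (PySem.Dict.counter ((discount.drop 0).take m)).get? k := by
      rw [hwin]; exact fun k => rfl
    rw [show PySem.List.pyRange ((m : Int)) ((discount.length : Int)) 1
        = PySem.List.pyRange (((0 + m : Nat) : Nat) : Int) ((discount.length : Int)) 1 by norm_num]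
    rw [loop_lemma D hnn discount m (discount.length - m) 0 (by omega) _ _ hw0
      (PySem.Dict.nodup_keys_counter _)]
    rw [PySem.List.foldl_count_if
      (fun i => pyDictEq D (PySem.Dict.counter (PySem.List.slice discount (some i) (some (i + (m : Int))))))]
    rw [show (PySem.List.pyRange 0 ((discount.length : Int) - (m : Int) + 1) 1)
        = 0 :: PySem.List.pyRange (0 + 1) ((discount.length : Int) - (m : Int) + 1) 1
      from PySem.List.pyRange_one_cons (by omega)]
    rw [List.countP_cons]
    have hslice0 : PySem.List.slice discount (some 0) (some (0 + (m : Int)))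
        = (discount.drop 0).take m := by
      simpa using PySem.List.slice_natCast_add discount 0 m
    have h0 : pyDictEq (PySem.Dict.counter (PySem.List.slice discount none (some ((m : Nat) : Int)))) D
        = pyDictEq D (PySem.Dict.counter (PySem.List.slice discount (some 0) (some (0 + (m : Int))))) := by
      rw [hwin, hslice0]
      exact pyDictEq_swap_congr _ _ D (fun k => rfl)
        (PySem.Dict.nodup_keys_counter _) (PySem.Dict.nodup_keys_counter _) hnn
    rw [h0]
    rw [show (((0 + 1 : Nat) : Nat) : Int) = (0 : Int) + 1 by norm_num]
    split <;> push_cast <;> ring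

-- ===== VERDICT (by name: the statement is the Claim_ definition above) =====
theorem solution_spec : Claim_equal_solution := by
  intro want number discount _ hpre
  exact main_thm want number discount hpre.1 hpre.2
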